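-- pv_equiv track=rewrite | github.com/hangli22/CodeGraph_Strengthened_Swe_Agent | code_graph_builder/inheritance.py | _lookup_class
-- ===== SOURCE A (Python) =====
-- from typing import Dict, List, Optional, Set, Tuple
--
-- def _lookup_class(
--
--     name: str,
--     accessible_files: Set[str],
--     class_name_index: Dict[str, List[Tuple[str, str]]],
--     current_file: str,
-- ) -> Optional[str]:
--     """
--     按优先级查找父类节点 id：
--     1. 当前文件内
--     2. 通过 import 可达的文件内
--     3. 全仓库广播匹配
--     """
--     if name not in class_name_index:
--         return None
--     candidates = class_name_index[name]
--
--     # 优先：当前文件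
--     for nid, frel in candidates:
--         if frel == current_file:
--             return nid
--     # 次选：import 可达文件
--     for nid, frel in candidates:
--         if frel in accessible_files:
--             return nid
--     # 兜底：全仓库第一个匹配
--     return candidates[0][0] if candidates else None
-- ===== SOURCE B (Python) =====
-- def _lookup_class(name, accessible_files, class_name_index, current_file):
--     candidates = class_name_index.get(name)
--     if not candidates:
--         return None
--     def rank(frel):
--         if frel == current_file:
--             return 0
--         if frel in accessible_files:
--             return 1
--         return 2
--     return min(candidates, key=lambda c: rank(c[1]))[0]
-- ===== Notes on version B (the rewrite author's own statement) =====
-- stated objective: alternative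
-- what changed: Replaces A's three staged scans (current file, then accessible files, then fallback to the first candidate) by scoring every candidate with a priority rank and taking the first minimum with a single stable min-by-key.
import Mathlib
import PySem

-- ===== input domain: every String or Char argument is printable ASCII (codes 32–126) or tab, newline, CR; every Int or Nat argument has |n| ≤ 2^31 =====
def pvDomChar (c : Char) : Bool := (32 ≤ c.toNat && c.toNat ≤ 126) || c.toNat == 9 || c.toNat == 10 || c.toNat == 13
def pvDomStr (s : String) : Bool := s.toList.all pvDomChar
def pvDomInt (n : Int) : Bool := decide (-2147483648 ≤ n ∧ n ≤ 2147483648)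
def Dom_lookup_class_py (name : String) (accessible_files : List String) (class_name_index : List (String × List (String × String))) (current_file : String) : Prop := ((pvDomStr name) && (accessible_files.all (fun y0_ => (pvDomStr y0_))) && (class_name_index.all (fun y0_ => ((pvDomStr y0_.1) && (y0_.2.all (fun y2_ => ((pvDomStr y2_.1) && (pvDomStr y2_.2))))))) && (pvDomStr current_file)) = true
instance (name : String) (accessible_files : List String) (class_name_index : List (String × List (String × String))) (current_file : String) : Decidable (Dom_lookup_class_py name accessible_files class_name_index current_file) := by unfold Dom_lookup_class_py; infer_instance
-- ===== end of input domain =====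

-- B scores every candidate with a priority rank (0 = current file, 1 = import-accessible,
-- 2 = other) and returns the first minimum via one stable min-by-key, instead of A's
-- staged scans; same return value.

-- ===== PORT A =====
-- first loop of A: first candidate whose file equals current_file
def pvScanCur : List (String × String) → String → Option String
  | [], _ => none
  | (nid, frel) :: rest, cf => if frel == cf then some nid else pvScanCur rest cf

-- second loop of A: first candidate whose file is import-accessible
def pvScanAcc : List (String × String) → List String → Option String
  | [], _ => none
  | (nid, frel) :: rest, acc => if acc.contains frel then some nid else pvScanAcc rest acc

def lookup_class_py (name : String) (accessible_files : List String) (class_name_index : List (String × List (String × String))) (current_file : String) : Option String :=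
  match (PySem.Dict.mk class_name_index).get? name with
  | none => none
  | some candidates =>
    match pvScanCur candidates current_file with
    | some nid => some nid
    | none =>
      match pvScanAcc candidates accessible_files with
      | some nid => some nid
      | none =>
        match candidates with
        | [] => none
        | (nid, _) :: _ => some nid

-- ===== PORT B =====
-- B's rank: priority score of a candidate's file
def pvRank (accessible_files : List String) (current_file : String) (frel : String) : Nat :=
  if frel == current_file then 0
  else if accessible_files.contains frel then 1
  else 2

def lookup_class_py_alt (name : String) (accessible_files : List String) (class_name_index : List (String × List (String × String))) (current_file : String) : Option String :=
  match (PySem.Dict.mk class_name_index).get? name with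
  | none => none
  | some [] => none        -- Python's `if not candidates`
  | some candidates =>
    -- min(candidates, key=...)[0]; candidates is nonempty so min? is some
    match PySem.List.min? candidates (fun c => pvRank accessible_files current_file c.2) with
    | some c => some c.1
    | none => none

-- ===== PRECONDITION & SPEC =====
def Spec_lookup_class_py (name : String) (accessible_files : List String) (class_name_index : List (String × List (String × String))) (current_file : String) (out : Option String) : Prop := out = lookup_class_py_alt name accessible_files class_name_index current_file
instance (name : String) (accessible_files : List String) (class_name_index : List (String × List (String × String))) (current_file : String) (out : Option String) : Decidable (Spec_lookup_class_py name accessible_files class_name_index current_file out) := by unfold Spec_lookup_class_py; infer_instance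

-- ===== CLAIM (what is proved, stated in full; the proofs are below) =====
def Claim_equal_lookup_class_py : Prop := ∀ (name : String) (accessible_files : List String) (class_name_index : List (String × List (String × String))) (current_file : String), Dom_lookup_class_py name accessible_files class_name_index current_file → Spec_lookup_class_py name accessible_files class_name_index current_file (lookup_class_py name accessible_files class_name_index current_file)

-- ===== LEMMAS AND PROOFS =====

-- proof-side view of PySem.List.min?'s fold step
def pvMinStep {α : Type} (key : α → Nat) (acc : Option α) (x : α) : Option α :=
  match acc with
  | none => some x
  | some m => if key x < key m then some x else some m

-- folding from `some m` either keeps m or takes the first strict improver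
theorem pvMin_seed {α : Type} (key : α → Nat) (t : List α) (m : α) :
    t.foldl (pvMinStep key) (some m) =
      match PySem.List.min? t key with
      | none => some m
      | some m' => if key m' < key m then some m' else some m := by
  induction t generalizing m with
  | nil => simp [PySem.List.min?]
  | cons x t ih =>
    have hx : PySem.List.min? (x :: t) key = t.foldl (pvMinStep key) (some x) := rfl
    have l1 : (x :: t).foldl (pvMinStep key) (some m)
        = t.foldl (pvMinStep key) (pvMinStep key (some m) x) := rfl
    rw [hx, l1, ih x]
    by_cases h : key x < key m
    · have : pvMinStep key (some m) x = some x := by simp [pvMinStep, h]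
      rw [this, ih x]
      cases PySem.List.min? t key with
      | none => simp [h]
      | some m' =>
        by_cases h' : key m' < key x <;> by_cases h'' : key m' < key m <;>
          simp [h', h''] <;>
          first | rfl | (exfalso; omega) | (intro hle; exfalso; omega)
    · have : pvMinStep key (some m) x = some m := by simp [pvMinStep, h]
      rw [this, ih m]
      cases PySem.List.min? t key with
      | none => simp [h]
      | some m' =>
        by_cases h' : key m' < key x <;> by_cases h'' : key m' < key m <;>
          simp [h', h''] <;>
          first | rfl | (exfalso; omega) | (intro hle; exfalso; omega)

-- A's name scans are find? followed by projection
theorem pvScanCur_eq_find (cs : List (String × String)) (cf : String) :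
    pvScanCur cs cf = (cs.find? (fun c => c.2 == cf)).map Prod.fst := by
  induction cs with
  | nil => rfl
  | cons c t ih =>
    obtain ⟨nid, frel⟩ := c
    by_cases h : frel == cf <;> simp [pvScanCur, List.find?, h, ih]

theorem pvScanAcc_eq_find (cs : List (String × String)) (acc : List String) :
    pvScanAcc cs acc = (cs.find? (fun c => acc.contains c.2)).map Prod.fst := by
  induction cs with
  | nil => rfl
  | cons c t ih =>
    obtain ⟨nid, frel⟩ := c
    by_cases h : frel ∈ acc <;> simp [pvScanAcc, List.find?, h, ih]

-- min-by-rank is: the first rank-0 candidate, else the first rank-≤1 candidate, else the head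
theorem pvMin_char (acc : List String) (cf : String) (cs : List (String × String)) :
    PySem.List.min? cs (fun c => pvRank acc cf c.2) =
      match cs.find? (fun c => c.2 == cf) with
      | some c => some c
      | none =>
        match cs.find? (fun c => acc.contains c.2) with
        | some c => some c
        | none => cs.head? := by
  induction cs with
  | nil => rfl
  | cons c t ih =>
    have hcons : PySem.List.min? (c :: t) (fun c => pvRank acc cf c.2) =
        t.foldl (pvMinStep (fun c => pvRank acc cf c.2)) (some c) := rfl
    rw [hcons, pvMin_seed (fun c => pvRank acc cf c.2) t c, ih]
    by_cases h0 : c.2 = cf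
    · -- head has rank 0: nothing beats it strictly
      have hr : pvRank acc cf c.2 = 0 := by simp [pvRank, h0]
      cases hf0 : t.find? (fun c => c.2 == cf) with
      | some c0 => simp [h0] <;> (intro hlt; exfalso; simp [pvRank] at hlt)
      | none =>
        cases hf1 : t.find? (fun c => acc.contains c.2) with
        | some c1 => simp [h0] <;> (intro hlt; exfalso; simp [pvRank] at hlt)
        | none => cases t <;> simp [h0] <;> (intro hlt; exfalso; simp [pvRank] at hlt)
    · by_cases h1 : c.2 ∈ acc
      · -- head has rank 1
        have hr : pvRank acc cf c.2 = 1 := by simp [pvRank, h0, h1]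
        cases hf0 : t.find? (fun c => c.2 == cf) with
        | some c0 =>
          have hp := List.find?_some hf0
          have hr0 : pvRank acc cf c0.2 = 0 := by
            simp at hp; simp [pvRank, hp]
          simp [List.find?_cons, h0, h1, hr, hr0, hf0]
        | none =>
          cases hf1 : t.find? (fun c => acc.contains c.2) with
          | some c1 =>
            have hp := List.find?_some hf1
            have hmem : c1 ∈ t := List.mem_of_find?_eq_some hf1
            have hnp0 := List.find?_eq_none.mp hf0 c1 hmem
            have hr1 : pvRank acc cf c1.2 = 1 := by
              simp at hp hnp0; simp [pvRank, hp, hnp0]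
            simp [List.find?_cons, h0, h1, hr, hr1, hf0, hf1]
          | none =>
            cases ht : t with
            | nil => simp [List.find?_cons, h0, h1]
            | cons d t' =>
              subst ht
              have hd2 : ¬ d.2 = cf := by
                simpa using List.find?_eq_none.mp hf0 d List.mem_cons_self
              have hf0' : List.find? (fun c => c.2 == cf) t' = none :=
                List.find?_eq_none.mpr
                  (fun x hx => List.find?_eq_none.mp hf0 x (List.mem_cons_of_mem _ hx))
              simp [List.find?_cons, h0, h1, hr, hd2, hf0'] <;>
                (intro h2; exfalso; rw [pvRank] at h2; split_ifs at h2 <;> simp_all)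
      · -- head has rank 2
        have hr : pvRank acc cf c.2 = 2 := by simp [pvRank, h0, h1]
        cases hf0 : t.find? (fun c => c.2 == cf) with
        | some c0 =>
          have hp := List.find?_some hf0
          have hr0 : pvRank acc cf c0.2 = 0 := by
            simp at hp; simp [pvRank, hp]
          simp [List.find?_cons, h0, h1, hr, hr0, hf0]
        | none =>
          cases hf1 : t.find? (fun c => acc.contains c.2) with
          | some c1 =>
            have hp := List.find?_some hf1
            have hmem : c1 ∈ t := List.mem_of_find?_eq_some hf1
            have hnp0 := List.find?_eq_none.mp hf0 c1 hmem
            have hr1 : pvRank acc cf c1.2 = 1 := by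
              simp at hp hnp0; simp [pvRank, hp, hnp0]
            have hf1' : List.find? (fun c => decide (c.2 ∈ acc)) t = some c1 := by
              simpa using hf1
            simp [List.find?_cons, h0, h1, hr, hr1, hf0, hf1, hf1']
          | none =>
            -- everything in t has rank 2: the min-fold keeps the head
            cases ht : t with
            | nil => simp [List.find?_cons, h0, h1]
            | cons d t' =>
              subst ht
              have hd2 : ¬ d.2 = cf := by
                simpa using List.find?_eq_none.mp hf0 d List.mem_cons_self
              have hdacc : d.2 ∉ acc := by
                simpa using List.find?_eq_none.mp hf1 d List.mem_cons_self
              have hf0' : List.find? (fun c => c.2 == cf) t' = none :=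
                List.find?_eq_none.mpr
                  (fun x hx => List.find?_eq_none.mp hf0 x (List.mem_cons_of_mem _ hx))
              have hf1' : List.find? (fun c => acc.contains c.2) t' = none :=
                List.find?_eq_none.mpr
                  (fun x hx => List.find?_eq_none.mp hf1 x (List.mem_cons_of_mem _ hx))
              have hrd : pvRank acc cf d.2 = 2 := by simp [pvRank, hd2, hdacc]
              have hf1'' : List.find? (fun c => decide (c.2 ∈ acc)) t' = none := by
                simpa using hf1'
              simp [List.find?_cons, h0, h1, hr, hd2, hdacc, hf0', hf1', hf1'', hrd]

-- ===== VERDICT (by name: the statement is the Claim_ definition above) =====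
theorem lookup_class_py_spec : Claim_equal_lookup_class_py := by
  intro name acc idx cf _
  unfold Spec_lookup_class_py
  cases h : (PySem.Dict.mk idx).get? name with
  | none => simp [lookup_class_py, lookup_class_py_alt, h]
  | some cs =>
    cases cs with
    | nil => simp [lookup_class_py, lookup_class_py_alt, h, pvScanCur, pvScanAcc]
    | cons c t =>
      simp only [lookup_class_py, lookup_class_py_alt, h]
      rw [pvScanCur_eq_find, pvScanAcc_eq_find, pvMin_char]
      cases hf0 : (c :: t).find? (fun c => c.2 == cf) with
      | some c0 => simp [hf0]
      | none =>
        cases hf1 : (c :: t).find? (fun c => acc.contains c.2) with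
        | some c1 => simp [hf0, hf1]
        | none => simp [hf0, hf1]
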